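-- pv_equiv track=rewrite | github.com/tomszwagier/eigengap-sparsity | psa.py | sep_to_type
-- ===== SOURCE A (Python) =====
-- def sep_to_type(seps):
--     model = [1]
--     for sep in seps:
--         if sep:
--             model.append(1)
--         else:
--             model[-1] += 1
--     return model
-- ===== SOURCE B (Python) =====
-- def sep_to_type(seps):
--     seps = list(seps)
--     positions = [-1] + [i for i, s in enumerate(seps) if s] + [len(seps)]
--     return [b - a for a, b in zip(positions, positions[1:])]
-- ===== Notes on version B (the rewrite author's own statement) =====
-- stated objective: alternative
-- what changed: B computes the group sizes as consecutive differences of the separator positions bracketed by -1 and len(seps), instead of growing/incrementing the last element of an accumulator list.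
import Mathlib
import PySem

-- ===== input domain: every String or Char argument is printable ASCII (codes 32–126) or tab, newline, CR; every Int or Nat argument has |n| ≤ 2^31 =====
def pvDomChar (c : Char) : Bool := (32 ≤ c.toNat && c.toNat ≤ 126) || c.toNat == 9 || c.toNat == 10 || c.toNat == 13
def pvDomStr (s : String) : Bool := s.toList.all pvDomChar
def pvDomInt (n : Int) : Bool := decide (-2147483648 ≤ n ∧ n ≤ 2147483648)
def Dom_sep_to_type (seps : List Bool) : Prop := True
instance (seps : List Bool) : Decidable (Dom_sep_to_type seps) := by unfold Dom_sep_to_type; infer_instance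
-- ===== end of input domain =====

-- B rephrases the accumulator loop as consecutive differences of the bracketed separator positions; objective: alternative.

-- ===== PORT A =====
-- model[-1] += 1 (model is always nonempty in A)
def pvIncLast : List Int → List Int
  | [] => []
  | [x] => [x + 1]
  | x :: y :: xs => x :: pvIncLast (y :: xs)

def sep_to_type (seps : List Bool) : List Int :=
  seps.foldl (fun model sep => if sep then model ++ [1] else pvIncLast model) [1]

-- ===== PORT B =====
def sep_to_type_alt (seps : List Bool) : List Int :=
  let positions : List Int :=
    [-1] ++ ((PySem.List.enumerate seps).filter (fun p => p.2)).map (fun p => p.1)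
        ++ [(seps.length : Int)]
  List.zipWith (fun a b => b - a) positions (positions.drop 1)

-- ===== PRECONDITION & SPEC =====
def Spec_sep_to_type (seps : List Bool) (out : List Int) : Prop := out = sep_to_type_alt seps
instance (seps : List Bool) (out : List Int) : Decidable (Spec_sep_to_type seps out) := by unfold Spec_sep_to_type; infer_instance

-- ===== CLAIM (what is proved, stated in full; the proofs are below) =====
def Claim_equal_sep_to_type : Prop := ∀ (seps : List Bool), Dom_sep_to_type seps → Spec_sep_to_type seps (sep_to_type seps)

-- ===== LEMMAS AND PROOFS =====

def pvDiffs (l : List Int) : List Int := List.zipWith (fun a b => b - a) l (l.drop 1)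

def pvTrueIdx (seps : List Bool) : List Int :=
  ((PySem.List.enumerate seps).filter (fun p => p.2)).map (fun p => p.1)

theorem pvDiffs_cons_cons (a b : Int) (t : List Int) :
    pvDiffs (a :: b :: t) = (b - a) :: pvDiffs (b :: t) := rfl

theorem pvDiffs_concat : ∀ (q : List Int) (x : Int) (h : q ≠ []),
    pvDiffs (q ++ [x]) = pvDiffs q ++ [x - q.getLast h]
  | [], _, h => absurd rfl h
  | [a], x, _ => rfl
  | a :: c :: t, x, _ => by
      have ih := pvDiffs_concat (c :: t) x (by simp)
      rw [show (a :: c :: t) ++ [x] = a :: ((c :: t) ++ [x]) from by simp,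
        show a :: ((c :: t) ++ [x]) = a :: c :: (t ++ [x]) from by simp,
        pvDiffs_cons_cons, show (c : Int) :: (t ++ [x]) = (c :: t) ++ [x] from by simp, ih,
        pvDiffs_cons_cons]
      simp [List.getLast]

theorem pvIncLast_concat : ∀ (l : List Int) (x : Int),
    pvIncLast (l ++ [x]) = l ++ [x + 1]
  | [], x => rfl
  | [a], x => rfl
  | a :: c :: t, x => by
      rw [show (a :: c :: t) ++ [x] = a :: ((c :: t) ++ [x]) from by simp,
        show a :: ((c :: t) ++ [x]) = a :: c :: (t ++ [x]) from by simp]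
      rw [pvIncLast, ← List.cons_append, pvIncLast_concat (c :: t) x]
      simp

theorem pvTrueIdx_concat (xs : List Bool) (b : Bool) :
    pvTrueIdx (xs ++ [b]) = pvTrueIdx xs ++ (if b then [((xs.length : Int))] else []) := by
  simp only [pvTrueIdx, PySem.List.enumerate_append]
  cases b <;> simp

theorem sep_to_type_alt_eq (seps : List Bool) :
    sep_to_type_alt seps = pvDiffs ((-1 :: pvTrueIdx seps) ++ [(seps.length : Int)]) := rfl

theorem sep_to_type_concat (xs : List Bool) (b : Bool) :
    sep_to_type (xs ++ [b]) =
      if b then sep_to_type xs ++ [1] else pvIncLast (sep_to_type xs) := by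
  simp [sep_to_type, List.foldl_append]

theorem sep_to_type_main (seps : List Bool) : sep_to_type seps = sep_to_type_alt seps := by
  induction seps using List.reverseRecOn with
  | nil => rfl
  | append_singleton xs b ih =>
      rw [sep_to_type_concat, ih, sep_to_type_alt_eq, sep_to_type_alt_eq, pvTrueIdx_concat]
      cases b with
      | true =>
          have h2 : pvDiffs ((-1 :: (pvTrueIdx xs ++ [((xs.length : Int))]))
                ++ [(((xs ++ [true]).length : Nat) : Int)])
              = pvDiffs ((-1 :: pvTrueIdx xs) ++ [((xs.length : Int))]) ++ [1] := by
            rw [show (-1 :: (pvTrueIdx xs ++ [((xs.length : Int))]))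
                  ++ [(((xs ++ [true]).length : Nat) : Int)]
                = ((-1 :: pvTrueIdx xs) ++ [((xs.length : Int))]) ++ [(xs.length : Int) + 1]
                from by simp,
              pvDiffs_concat _ _ (by simp)]
            simp
          rw [if_pos rfl, if_pos rfl, h2]
      | false =>
          have hn : (((xs ++ [false]).length : Nat) : Int) = (xs.length : Int) + 1 := by simp
          rw [if_neg (by simp), if_neg (by simp), hn, List.append_nil,
            pvDiffs_concat _ _ (by simp), pvDiffs_concat _ _ (by simp), pvIncLast_concat]
          congr 2
          ring

-- ===== VERDICT (by name: the statement is the Claim_ definition above) =====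
theorem sep_to_type_spec : Claim_equal_sep_to_type := by
  intro seps _
  unfold Spec_sep_to_type
  exact sep_to_type_main seps
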